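-- pv_equiv track=rewrite | github.com/nhsx/hypergraphical | utils.py | agg_prog
-- ===== SOURCE A (Python) =====
-- def agg_prog(final_prog):
--     """Find the aggregate progression set from a final progression set.
--     This is used for defining the hyperarcs.
--
--     Args:
--         final_prog (list): A list of strings where the order of the
--                 elements match the order of occurence e.g. ['a', 'c', 'b']
--
--     Returns:
--         list: Aggregated progression sets to show disease progression.
--                 NOTE: This does not consider duplicates (no temporal element)
--     """
--     aggregate_prog_list = []
--     for k in range(
--         2, len(final_prog) + 1
--     ):  # 2 as self-loops aren't used patients with >1 disease
--         aggregate_prog = final_prog[:k]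
--         aggregate_prog_list.append(tuple(aggregate_prog))
--
--     if len(final_prog) == 1:  # to get self-loops for patients with one disease
--         aggregate_prog = [x for pair in zip(final_prog, final_prog) for x in pair]
--         aggregate_prog = tuple(aggregate_prog)
--         aggregate_prog_list = [aggregate_prog]
--     return aggregate_prog_list
-- ===== SOURCE B (Python) =====
-- def agg_prog(final_prog):
--     if len(final_prog) == 1:
--         return [(final_prog[0], final_prog[0])]
--     result = []
--     prefix = []
--     for x in final_prog:
--         prefix.append(x)
--         if len(prefix) >= 2:
--             result.append(tuple(prefix))
--     return result
-- ===== Notes on version B (the rewrite author's own statement) =====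
-- stated objective: simpler
-- what changed: B handles the length-1 self-loop case with an up-front guard and otherwise builds each prefix incrementally by extending one maintained list in a single pass, instead of re-slicing final_prog[:k] for every k in a range loop.
import Mathlib
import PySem

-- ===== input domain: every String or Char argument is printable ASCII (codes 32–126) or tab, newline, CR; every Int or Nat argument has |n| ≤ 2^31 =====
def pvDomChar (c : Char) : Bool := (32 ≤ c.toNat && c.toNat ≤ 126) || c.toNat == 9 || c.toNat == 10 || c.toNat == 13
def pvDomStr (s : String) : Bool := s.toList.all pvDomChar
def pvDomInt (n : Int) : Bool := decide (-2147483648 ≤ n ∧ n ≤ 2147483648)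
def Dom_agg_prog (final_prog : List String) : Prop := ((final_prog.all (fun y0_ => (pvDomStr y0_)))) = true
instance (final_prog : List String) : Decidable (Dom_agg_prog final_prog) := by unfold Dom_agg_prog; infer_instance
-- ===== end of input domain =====

-- B replaces A's range-and-slice loop by a length-1 guard plus one incremental pass
-- extending a maintained prefix list (same values; 'alternative', not measured faster).

-- ===== PORT A =====
-- for k in range(2, len(final_prog)+1): aggregate_prog_list.append(tuple(final_prog[:k]))
-- then the len == 1 self-loop branch replaces the list.
def agg_prog (final_prog : List String) : List (List String) :=
  let aggregate_prog_list : List (List String) :=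
    (PySem.List.pyRange 2 ((final_prog.length : Int) + 1) 1).foldl
      (fun acc k => acc ++ [PySem.List.slice final_prog none (some k)]) []
  if final_prog.length == 1 then
    [(final_prog.zip final_prog).flatMap (fun pair => [pair.1, pair.2])]
  else
    aggregate_prog_list

-- ===== PORT B =====
-- loop of Source B: running 'prefix' grows by one element; prefixes of length ≥ 2 are emitted.
def aggLoop (rest pre : List String) (result : List (List String)) : List (List String) :=
  match rest with
  | [] => result
  | x :: rest' =>
    let p := pre ++ [x]
    aggLoop rest' p (if 2 ≤ p.length then result ++ [p] else result)

def agg_prog_alt (final_prog : List String) : List (List String) :=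
  match final_prog with
  | [x] => [[x, x]]
  | _ => aggLoop final_prog [] []

-- ===== PRECONDITION & SPEC =====
def Spec_agg_prog (final_prog : List String) (out : List (List String)) : Prop := out = agg_prog_alt final_prog
instance (final_prog : List String) (out : List (List String)) : Decidable (Spec_agg_prog final_prog out) := by unfold Spec_agg_prog; infer_instance

-- ===== CLAIM (what is proved, stated in full; the proofs are below) =====
def Claim_equal_agg_prog : Prop := ∀ (final_prog : List String), Dom_agg_prog final_prog → Spec_agg_prog final_prog (agg_prog final_prog)

-- ===== LEMMAS AND PROOFS =====

-- once the running prefix is nonempty, every extension is emitted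
theorem aggLoop_of_ne_nil (rest : List String) : ∀ (pre : List String) (acc : List (List String)),
    1 ≤ pre.length →
    aggLoop rest pre acc = acc ++ (List.range rest.length).map (fun i => pre ++ rest.take (i + 1)) := by
  induction rest with
  | nil => intro pre acc h; simp [aggLoop]
  | cons x rest' ih =>
    intro pre acc h
    have h2 : 2 ≤ (pre ++ [x]).length := by simp; omega
    simp only [aggLoop, if_pos h2]
    rw [ih (pre ++ [x]) _ (by simp)]
    simp [List.range_succ_eq_map, List.map_map, Function.comp_def, List.append_assoc]

theorem aggLoop_start (x : String) (rest : List String) :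
    aggLoop (x :: rest) [] [] = (List.range rest.length).map (fun i => (x :: rest).take (i + 2)) := by
  have h2 : ¬ 2 ≤ ([] ++ [x] : List String).length := by simp
  simp only [aggLoop, if_neg h2]
  rw [aggLoop_of_ne_nil rest ([] ++ [x]) [] (by simp)]
  simp [List.take_succ_cons]

-- A's range-and-slice loop produces the same prefix list
theorem agg_prog_A_map (final_prog : List String) :
    (PySem.List.pyRange 2 ((final_prog.length : Int) + 1) 1).foldl
      (fun acc k => acc ++ [PySem.List.slice final_prog none (some k)]) []
    = (List.range ((final_prog.length : Int) + 1 - 2).toNat).map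
        (fun k => final_prog.take (k + 2)) := by
  rw [PySem.List.foldl_append_singleton_eq_map, PySem.List.pyRange_one, List.map_map]
  refine List.map_congr_left ?_
  intro k _
  have h1 : ((2 : Int) + k) = ((k + 2 : Nat) : Int) := by push_cast; ring
  simp only [Function.comp_def, h1, PySem.List.slice_to_natCast]

theorem agg_prog_spec : Claim_equal_agg_prog := by
  unfold Claim_equal_agg_prog Spec_agg_prog
  intro fp _
  match fp with
  | [] => decide
  | [x] =>
    simp [agg_prog, agg_prog_alt]
  | x :: y :: rest =>
    have hne : ((x :: y :: rest).length == 1) = false := by simp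
    simp only [agg_prog, hne, Bool.false_eq_true, if_false]
    rw [agg_prog_A_map]
    show _ = agg_prog_alt (x :: y :: rest)
    simp only [agg_prog_alt]
    rw [aggLoop_start]
    have hn : (((x :: y :: rest).length : Int) + 1 - 2).toNat = (y :: rest).length := by
      simp; omega
    rw [hn]
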